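-- pv_equiv track=rewrite | github.com/acmeism/RosettaCodeData | Task/Factorial-base-numbers-indexing-permutations-of-a-collection/Python/factorial-base-numbers-indexing-permutations-of-a-collection.py | int_to_fbn
-- ===== SOURCE A (Python) =====
-- def int_to_fbn(i):
--     """
--
--     convert integer i to factorial based number
--
--     """
--     current = i
--     divisor = 2
--     new_fbn = []
--     while current > 0:
--         remainder = current % divisor
--         current = current // divisor
--         new_fbn.append(remainder)
--         divisor += 1
--
--     return list(reversed(new_fbn))
-- ===== SOURCE B (Python) =====
-- def int_to_fbn(i):
--     """
--
--     convert integer i to factorial based number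
--
--     """
--     if i <= 0:
--         return []
--     # factorial weights [1!, 2!, ..., k!] with k! the largest factorial <= i
--     weights = [1]
--     j = 1
--     while weights[-1] * (j + 1) <= i:
--         j += 1
--         weights.append(weights[-1] * j)
--     # most-significant digit first: divide down the precomputed weights
--     out = []
--     cur = i
--     for w in reversed(weights):
--         out.append(cur // w)
--         cur %= w
--     return out
-- ===== Notes on version B (the rewrite author's own statement) =====
-- stated objective: alternative
-- what changed: Instead of A's bottom-up loop (repeated % and // by a growing divisor, collecting least-significant digits and reversing at the end), B first grows the list of factorial weights up to the largest factorial not exceeding i, then emits the digits most-significant-first by dividing down the precomputed weights, with no final reversal.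
import Mathlib
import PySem

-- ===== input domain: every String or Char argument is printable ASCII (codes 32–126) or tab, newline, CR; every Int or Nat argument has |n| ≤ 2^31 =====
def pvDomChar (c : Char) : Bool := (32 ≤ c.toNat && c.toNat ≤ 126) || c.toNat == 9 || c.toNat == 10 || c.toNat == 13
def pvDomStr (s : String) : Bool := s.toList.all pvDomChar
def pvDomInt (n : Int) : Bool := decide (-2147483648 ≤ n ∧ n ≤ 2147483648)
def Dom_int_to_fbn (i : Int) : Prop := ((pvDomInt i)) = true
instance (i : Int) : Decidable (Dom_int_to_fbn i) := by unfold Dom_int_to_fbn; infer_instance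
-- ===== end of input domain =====

-- B replaces A's divide-and-reverse loop by precomputing the factorial weights and emitting
-- the digits most-significant-first by top-down division (objective: alternative decomposition).

-- ===== PORT A =====
-- A's while loop: repeated % and // by a growing divisor, digits least-significant-first.
-- (the '2 ≤ divisor' conjunct only makes the recursion total; every call has divisor ≥ 2)
def aLoop (current divisor : Int) : List Int :=
  if h : 0 < current ∧ 2 ≤ divisor then
    PySem.Int.mod current divisor :: aLoop (PySem.Int.floordiv current divisor) (divisor + 1)
  else []
termination_by current.toNat
decreasing_by
  have hlt : PySem.Int.floordiv current divisor < current :=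
    (PySem.Int.floordiv_lt_iff_lt_mul (by omega : (0:Int) < divisor)).2
      (by nlinarith [h.1, h.2])
  omega

def int_to_fbn (i : Int) : List Int := (aLoop i 2).reverse

-- ===== PORT B =====
-- B's weight-growing while loop: returns [f, f*(j+1), f*(j+1)*(j+2), …] while the next
-- product stays ≤ i.  (the '1 ≤ f ∧ 1 ≤ j' conjuncts only make the recursion total;
-- the call in int_to_fbn_alt has f = j = 1 and the loop keeps f ≥ 1, j ≥ 1)
def growWeights (i f j : Int) : List Int :=
  if h : 1 ≤ f ∧ 1 ≤ j ∧ f * (j + 1) ≤ i then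
    f :: growWeights i (f * (j + 1)) (j + 1)
  else [f]
termination_by (i - f).toNat
decreasing_by
  have h2 : f + 1 ≤ f * (j + 1) := by nlinarith [h.1, h.2.1]
  omega

-- B's for-loop over the reversed weights: digit = cur // w, cur = cur % w.
def divOut (cur : Int) (ws : List Int) : List Int :=
  match ws with
  | [] => []
  | w :: rest => PySem.Int.floordiv cur w :: divOut (PySem.Int.mod cur w) rest

def int_to_fbn_alt (i : Int) : List Int :=
  if i ≤ 0 then [] else divOut i (growWeights i 1 1).reverse

-- ===== PRECONDITION & SPEC =====
def Spec_int_to_fbn (i : Int) (out : List Int) : Prop := out = int_to_fbn_alt i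
instance (i : Int) (out : List Int) : Decidable (Spec_int_to_fbn i out) := by unfold Spec_int_to_fbn; infer_instance

-- ===== CLAIM (what is proved, stated in full; the proofs are below) =====
def Claim_equal_int_to_fbn : Prop := ∀ (i : Int), Dom_int_to_fbn i → Spec_int_to_fbn i (int_to_fbn i)

-- ===== LEMMAS AND PROOFS =====

-- divOut together with the running remainder (proof-only helper).
def divOutP (cur : Int) (ws : List Int) : List Int × Int :=
  match ws with
  | [] => ([], cur)
  | w :: rest =>
    let p := divOutP (PySem.Int.mod cur w) rest
    (PySem.Int.floordiv cur w :: p.1, p.2)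

theorem divOut_eq_fst (ws : List Int) : ∀ c, divOut c ws = (divOutP c ws).1 := by
  induction ws with
  | nil => intro c; rfl
  | cons w rest ih => intro c; simp [divOut, divOutP, ih]

-- floor-division arithmetic: splitting one division by d·v into one by d then one by v
theorem fd_mul (a d v : Int) (hd : 0 < d) (hv : 0 < v) :
    PySem.Int.floordiv a (d * v) = PySem.Int.floordiv (PySem.Int.floordiv a d) v := by
  rw [PySem.Int.floordiv_eq_ediv_of_pos (by positivity : (0:Int) < d * v),
      PySem.Int.floordiv_eq_ediv_of_pos hd, PySem.Int.floordiv_eq_ediv_of_pos hv]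
  exact (Int.ediv_ediv_of_nonneg hd.le).symm

theorem fm_mod (a d v : Int) (hd : 0 < d) (hv : 0 < v) :
    PySem.Int.mod (PySem.Int.mod a (d * v)) d = PySem.Int.mod a d := by
  rw [PySem.Int.mod_eq_emod_of_pos (by positivity : (0:Int) < d * v),
      PySem.Int.mod_eq_emod_of_pos hd, PySem.Int.mod_eq_emod_of_pos hd]
  exact Int.emod_emod_of_dvd a ⟨v, rfl⟩

theorem fd_mod (a d v : Int) (hd : 0 < d) (hv : 0 < v) :
    PySem.Int.floordiv (PySem.Int.mod a (d * v)) d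
      = PySem.Int.mod (PySem.Int.floordiv a d) v := by
  rw [PySem.Int.mod_eq_emod_of_pos (by positivity : (0:Int) < d * v),
      PySem.Int.floordiv_eq_ediv_of_pos hd, PySem.Int.floordiv_eq_ediv_of_pos hd,
      PySem.Int.mod_eq_emod_of_pos hv]
  have hq := Int.ediv_add_emod a (d * v)
  set q := a / (d * v) with hqdef
  set r := a % (d * v) with hrdef
  have hr0 : 0 ≤ r := Int.emod_nonneg a (by positivity)
  have hrlt : r < d * v := Int.emod_lt_of_pos a (by positivity)
  have h1 : a / d = r / d + v * q := by
    have he : a = r + (v * q) * d := by nlinarith [hq]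
    rw [he, Int.add_mul_ediv_right _ _ (by omega : d ≠ 0)]
  rw [h1, Int.add_mul_emod_self_left]
  have hrd0 : 0 ≤ r / d := Int.ediv_nonneg hr0 hd.le
  have hrdlt : r / d < v := by
    rcases lt_or_ge (r / d) v with h | h
    · exact h
    · exfalso
      have h2 : (r / d) * d ≤ r := Int.ediv_mul_le r (by omega)
      nlinarith
  exact (Int.emod_eq_of_lt hrd0 hrdlt).symm

-- key lemma: dividing by weights all scaled by d equals first dividing by d,
-- then dividing by the unscaled weights (with the remainder tracked).
theorem divOutP_map_mul (d : Int) (hd : 0 < d) :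
    ∀ (vs : List Int), (∀ v ∈ vs, 0 < v) → ∀ c,
      divOutP c (vs.map (fun v => d * v)) =
        ((divOutP (PySem.Int.floordiv c d) vs).1,
         d * (divOutP (PySem.Int.floordiv c d) vs).2 + PySem.Int.mod c d) := by
  intro vs
  induction vs with
  | nil =>
    intro _ c
    simp only [List.map_nil, divOutP]
    have := PySem.Int.floordiv_mul_add_mod c d
    simp only [Prod.mk.injEq, true_and]
    linarith [mul_comm (PySem.Int.floordiv c d) d]
  | cons v rest ih =>
    intro hpos c
    have hv : 0 < v := hpos v (by simp)
    have hrest : ∀ x ∈ rest, 0 < x := fun x hx => hpos x (by simp [hx])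
    simp only [List.map_cons, divOutP]
    rw [ih hrest (PySem.Int.mod c (d * v))]
    rw [fd_mul c d v hd hv, fd_mod c d v hd hv, fm_mod c d v hd hv]

-- appending the final weight 1 emits the running remainder as last digit
theorem divOut_append_one : ∀ (ws : List Int) (c : Int),
    divOut c (ws ++ [1]) = (divOutP c ws).1 ++ [(divOutP c ws).2] := by
  intro ws
  induction ws with
  | nil =>
    intro c
    simp [divOut, divOutP, PySem.Int.floordiv]
  | cons w rest ih =>
    intro c
    simp [divOut, divOutP, ih]

-- a trailing weight 1 drives the remainder to 0
theorem divOutP_last_one : ∀ (ws : List Int) (c : Int),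
    (divOutP c (ws ++ [1])).2 = 0 := by
  intro ws
  induction ws with
  | nil => intro c; simp [divOutP, PySem.Int.mod]
  | cons w rest ih => intro c; simp [divOutP, ih]

-- growWeights always starts with its seed weight
theorem growWeights_head (i f j : Int) : ∃ t, growWeights i f j = f :: t := by
  rw [growWeights]
  split
  · exact ⟨_, rfl⟩
  · exact ⟨[], rfl⟩

-- all weights are ≥ 1
theorem growWeights_pos (i : Int) : ∀ (f j : Int), 1 ≤ f → ∀ w ∈ growWeights i f j, 1 ≤ w := by
  intro f j
  induction f, j using growWeights.induct i with
  | case1 f j h ih =>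
    intro hf w hw
    rw [growWeights, dif_pos h] at hw
    rcases List.mem_cons.1 hw with rfl | hw
    · exact hf
    · exact ih (by nlinarith [h.2.1]) w hw
  | case2 f j h =>
    intro hf w hw
    rw [growWeights, dif_neg h] at hw
    simp at hw; omega

-- scaling: the weights of i for seed d·f are d times the weights of i // d for seed f
theorem growWeights_mul (d : Int) (hd : 0 < d) :
    ∀ (f j i : Int), 1 ≤ f →
      growWeights i (d * f) j
        = (growWeights (PySem.Int.floordiv i d) f j).map (fun v => d * v) := by
  intro f j i
  induction f, j using growWeights.induct (PySem.Int.floordiv i d) with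
  | case1 f j h ih =>
    intro hf
    have hg : 1 ≤ d * f ∧ 1 ≤ j ∧ d * f * (j + 1) ≤ i := by
      refine ⟨by nlinarith, h.2.1, ?_⟩
      have h3 := (PySem.Int.le_floordiv_iff_mul_le hd).1 h.2.2
      nlinarith
    rw [growWeights, dif_pos hg]
    conv_rhs => rw [growWeights, dif_pos h]
    simp only [List.map_cons, List.cons.injEq]
    refine ⟨trivial, ?_⟩
    have hrec := ih (by nlinarith [h.1, h.2.1])
    rw [show d * f * (j + 1) = d * (f * (j + 1)) by ring]
    exact hrec
  | case2 f j h =>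
    intro hf
    have hg : ¬ (1 ≤ d * f ∧ 1 ≤ j ∧ d * f * (j + 1) ≤ i) := by
      intro hc
      exact h ⟨hf, hc.2.1, (PySem.Int.le_floordiv_iff_mul_le hd).2 (by nlinarith [hc.2.2])⟩
    rw [growWeights, dif_neg hg]
    conv_rhs => rw [growWeights, dif_neg h]
    simp

-- main induction: A's reversed digit list equals B's top-down division,
-- for current = c > 0 and divisor = d ≥ 2 (B's weights seeded at j = d - 1).
theorem main_lemma : ∀ (n : Nat) (c d : Int), c.toNat ≤ n → 0 < c → 2 ≤ d →
    (aLoop c d).reverse = divOut c (growWeights c 1 (d - 1)).reverse := by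
  intro n
  induction n with
  | zero => intro c d hc h0 _; omega
  | succ n ih =>
    intro c d hc h0 hd
    have hdpos : (0:Int) < d := by omega
    by_cases hcd : c < d
    · -- one digit: A emits c % d = c; B's weight list is just [1]
      have hmod : PySem.Int.mod c d = c := by
        rw [PySem.Int.mod_eq_emod_of_pos hdpos]
        exact Int.emod_eq_of_lt h0.le hcd
      have hfd : PySem.Int.floordiv c d = 0 := by
        rw [PySem.Int.floordiv_eq_ediv_of_pos hdpos]
        exact Int.ediv_eq_zero_of_lt h0.le hcd
      rw [aLoop, dif_pos ⟨h0, hd⟩, hfd, aLoop, dif_neg (by omega)]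
      rw [growWeights, dif_neg (by intro hcon; omega)]
      simp [divOut, hmod, PySem.Int.floordiv]
    · -- c ≥ d: peel the least-significant digit on both sides
      push_neg at hcd
      have hc1 : 1 ≤ PySem.Int.floordiv c d :=
        (PySem.Int.le_floordiv_iff_mul_le hdpos).2 (by omega)
      have hlt : PySem.Int.floordiv c d < c :=
        (PySem.Int.floordiv_lt_iff_lt_mul hdpos).2 (by nlinarith)
      have hle : (PySem.Int.floordiv c d).toNat ≤ n := by omega
      -- LHS
      rw [aLoop, dif_pos ⟨h0, hd⟩]
      rw [List.reverse_cons]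
      rw [ih (PySem.Int.floordiv c d) (d + 1) hle (by omega) (by omega)]
      -- RHS: unfold growWeights once, then factor d out of the remaining weights
      have hgw1 : growWeights c 1 (d - 1) = 1 :: growWeights c d d := by
        rw [growWeights, dif_pos ⟨le_refl 1, by omega, by omega⟩]
        rw [show (1:Int) * ((d - 1) + 1) = d by ring, show (d - 1) + 1 = d by ring]
      have hmul := growWeights_mul d hdpos 1 d c le_rfl
      rw [mul_one] at hmul
      rw [hgw1, hmul]
      obtain ⟨t, ht⟩ := growWeights_head (PySem.Int.floordiv c d) 1 d
      have hpos : ∀ v ∈ (growWeights (PySem.Int.floordiv c d) 1 d).reverse, 0 < v := by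
        intro v hv
        have := growWeights_pos (PySem.Int.floordiv c d) 1 d le_rfl v (List.mem_reverse.1 hv)
        omega
      rw [show (d + 1) - 1 = d by ring]
      rw [List.reverse_cons, ← List.map_reverse]
      rw [divOut_append_one, divOutP_map_mul d hdpos _ hpos c]
      have hr0 : (divOutP (PySem.Int.floordiv c d)
          (growWeights (PySem.Int.floordiv c d) 1 d).reverse).2 = 0 := by
        rw [ht, List.reverse_cons]
        exact divOutP_last_one t.reverse _
      rw [hr0, mul_zero, zero_add]
      rw [divOut_eq_fst]

-- ===== VERDICT (by name: the statement is the Claim_ definition above) =====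
theorem int_to_fbn_spec : Claim_equal_int_to_fbn := by
  intro i _
  unfold Spec_int_to_fbn int_to_fbn int_to_fbn_alt
  by_cases h : i ≤ 0
  · rw [aLoop, dif_neg (by omega), if_pos h]; rfl
  · rw [if_neg h]
    have hm := main_lemma i.toNat i 2 le_rfl (by omega) le_rfl
    rw [show (2:Int) - 1 = 1 by ring] at hm
    exact hm
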